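-- pv_equiv track=rewrite | github.com/vivekpapnai/Python-DSA-Questions | Array/XOR queries.py | xorQueryBest
-- ===== SOURCE A (Python) =====
-- def xorQueryBest(queries):
--     # Write your code here.
--     arr = []
--     flag = 0
--     for i in range(len(queries)):
--         var = queries[i][0]
--         value = queries[i][1]
--         if var == 1:
--             arr.append(value^flag)
--         else:
--             flag = flag ^ value
--     for i in range(len(arr)):
--         arr[i] = arr[i] ^ flag
--     return arr
-- ===== SOURCE B (Python) =====
-- def xorQueryBest(queries):
--     out = []
--     suffix = 0
--     for var, value in reversed(queries):
--         if var == 1: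
--             out.append(value ^ suffix)
--         else:
--             suffix = suffix ^ value
--     out.reverse()
--     return out
-- ===== Notes on version B (the rewrite author's own statement) =====
-- stated objective: simpler
-- what changed: Single reverse pass with one suffix-XOR accumulator replaces A's forward pass plus a second fix-up pass re-XORing every emitted element with the final flag.
import Mathlib
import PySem

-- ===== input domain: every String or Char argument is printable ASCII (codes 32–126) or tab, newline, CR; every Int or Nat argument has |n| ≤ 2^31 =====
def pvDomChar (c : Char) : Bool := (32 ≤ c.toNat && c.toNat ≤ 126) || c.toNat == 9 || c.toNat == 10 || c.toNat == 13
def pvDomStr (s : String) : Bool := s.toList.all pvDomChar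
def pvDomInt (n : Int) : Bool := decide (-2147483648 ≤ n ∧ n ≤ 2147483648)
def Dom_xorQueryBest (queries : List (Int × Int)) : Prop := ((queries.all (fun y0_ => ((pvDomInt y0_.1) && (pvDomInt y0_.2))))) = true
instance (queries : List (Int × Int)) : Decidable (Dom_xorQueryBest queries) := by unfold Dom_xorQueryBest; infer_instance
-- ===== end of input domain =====

-- B replaces A's forward pass plus second fix-up pass by a single reverse pass with one suffix accumulator (objective: simpler).

-- ===== PORT A =====
-- A's for-loop over queries carrying (arr, flag); arr.append = arr ++ [·]; '^' = PySem.Int.bxor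
def xorQueryBestLoop : List (Int × Int) → List Int → Int → List Int × Int
  | [], arr, flag => (arr, flag)
  | (v, x) :: rest, arr, flag =>
      if v = 1 then xorQueryBestLoop rest (arr ++ [PySem.Int.bxor x flag]) flag
      else xorQueryBestLoop rest arr (PySem.Int.bxor flag x)

def xorQueryBest (queries : List (Int × Int)) : List Int :=
  let st := xorQueryBestLoop queries [] 0
  -- second loop: arr[i] = arr[i] ^ flag
  st.1.map (fun a => PySem.Int.bxor a st.2)

-- ===== PORT B =====
def xorQueryBestAltStep (st : List Int × Int) (q : Int × Int) : List Int × Int :=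
  if q.1 = 1 then (st.1 ++ [PySem.Int.bxor q.2 st.2], st.2)
  else (st.1, PySem.Int.bxor st.2 q.2)

def xorQueryBest_alt (queries : List (Int × Int)) : List Int :=
  let st := queries.reverse.foldl xorQueryBestAltStep ([], 0)
  st.1.reverse

-- ===== PRECONDITION & SPEC =====
def Spec_xorQueryBest (queries : List (Int × Int)) (out : List Int) : Prop := out = xorQueryBest_alt queries
instance (queries : List (Int × Int)) (out : List Int) : Decidable (Spec_xorQueryBest queries out) := by unfold Spec_xorQueryBest; infer_instance

-- ===== CLAIM (what is proved, stated in full; the proofs are below) =====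
def Claim_equal_xorQueryBest : Prop := ∀ (queries : List (Int × Int)), Dom_xorQueryBest queries → Spec_xorQueryBest queries (xorQueryBest queries)

-- ===== LEMMAS AND PROOFS =====

theorem bxor_eq_xor (a b : Int) : PySem.Int.bxor a b = Int.xor a b := by
  rcases a with m | m <;> rcases b with n | n <;>
    simp [PySem.Int.bxor, Int.xor, Int.negSucc_eq] <;> omega

theorem pv_bxor_assoc (a b c : Int) :
    PySem.Int.bxor (PySem.Int.bxor a b) c = PySem.Int.bxor a (PySem.Int.bxor b c) := by
  simp only [bxor_eq_xor]
  rcases a with m | m <;> rcases b with n | n <;> rcases c with k | k <;>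
    simp [Int.xor, Nat.xor_assoc]

-- A's loop with accumulator arr = arr prepended to the run from []
theorem xorQueryBestLoop_acc (qs : List (Int × Int)) (arr : List Int) (f : Int) :
    xorQueryBestLoop qs arr f =
      (arr ++ (xorQueryBestLoop qs [] f).1, (xorQueryBestLoop qs [] f).2) := by
  induction qs generalizing arr f with
  | nil => simp [xorQueryBestLoop]
  | cons q rest ih =>
      obtain ⟨v, x⟩ := q
      by_cases h : v = 1
      · simp only [xorQueryBestLoop, h, if_true, List.nil_append]
        rw [ih, ih [PySem.Int.bxor x f]]
        simp
      · simp only [xorQueryBestLoop, h, if_false]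
        exact ih arr _

-- B's foldl over the reversed list, written as a foldr over the original list
def xorAltG (qs : List (Int × Int)) : List Int × Int :=
  List.foldr (fun q st => xorQueryBestAltStep st q) ([], 0) qs

theorem xorQueryBest_alt_eq (qs : List (Int × Int)) :
    xorQueryBest_alt qs = (xorAltG qs).1.reverse := by
  simp [xorQueryBest_alt, xorAltG, List.foldl_reverse]

theorem xorAltG_snd_cons (v x : Int) (rest : List (Int × Int)) :
    (xorAltG ((v, x) :: rest)).2 =
      if v = 1 then (xorAltG rest).2 else PySem.Int.bxor (xorAltG rest).2 x := by
  by_cases h : v = 1 <;> simp [xorAltG, xorQueryBestAltStep, h]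

-- flag after A's loop starting at f equals f ^ (B's suffix accumulator over the whole list)
theorem flag_eq (qs : List (Int × Int)) (f : Int) :
    (xorQueryBestLoop qs [] f).2 = PySem.Int.bxor f (xorAltG qs).2 := by
  induction qs generalizing f with
  | nil => simp [xorQueryBestLoop, xorAltG]
  | cons q rest ih =>
      obtain ⟨v, x⟩ := q
      by_cases h : v = 1
      · simp only [xorQueryBestLoop, h, if_true, List.nil_append]
        rw [xorQueryBestLoop_acc, xorAltG_snd_cons]
        simp [ih]
      · simp only [xorQueryBestLoop, h, if_false]
        rw [ih, xorAltG_snd_cons]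
        simp only [h, if_false]
        rw [pv_bxor_assoc, PySem.Int.bxor_comm x]

theorem main_eq (qs : List (Int × Int)) (f : Int) :
    (xorQueryBestLoop qs [] f).1.map (fun a => PySem.Int.bxor a (xorQueryBestLoop qs [] f).2)
      = (xorAltG qs).1.reverse := by
  induction qs generalizing f with
  | nil => simp [xorQueryBestLoop, xorAltG]
  | cons q rest ih =>
      obtain ⟨v, x⟩ := q
      by_cases h : v = 1
      · subst h
        simp only [xorQueryBestLoop, if_true, List.nil_append]
        rw [xorQueryBestLoop_acc]
        have hx : xorAltG ((1, x) :: rest) =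
            ((xorAltG rest).1 ++ [PySem.Int.bxor x (xorAltG rest).2], (xorAltG rest).2) := by
          simp [xorAltG, xorQueryBestAltStep]
        rw [hx]
        simp only [List.singleton_append, List.map_cons, List.reverse_append, List.reverse_cons,
          List.reverse_nil, List.nil_append]
        rw [ih f, flag_eq]
        congr 1
        rw [pv_bxor_assoc, ← pv_bxor_assoc f, PySem.Int.bxor_self]
        rw [PySem.Int.bxor_comm 0, PySem.Int.bxor_zero]
      · simp only [xorQueryBestLoop, h, if_false]
        have hx : (xorAltG ((v, x) :: rest)).1 = (xorAltG rest).1 := by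
          simp [xorAltG, xorQueryBestAltStep, h]
        rw [hx, ih (PySem.Int.bxor f x)]

-- ===== VERDICT (by name: the statement is the Claim_ definition above) =====
theorem xorQueryBest_spec : Claim_equal_xorQueryBest := by
  intro qs _
  show xorQueryBest qs = xorQueryBest_alt qs
  rw [xorQueryBest_alt_eq]
  exact main_eq qs 0
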